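-- pv_equiv track=rewrite | github.com/josesousaribeiro/eXirt | pyexirt/eXirt.py | powerSetLimited
-- ===== SOURCE A (Python) =====
-- def powerSetLimited(s,l):
--
--     def powerset(s):
--       x = len(s)
--       masks = [1 << i for i in range(x)]
--       for i in range(1 << x):
--           yield [ss for mask, ss in zip(masks, s) if i & mask]
--
--     psl = []
--     ps = list(powerset(s))
--     for _,i in enumerate(ps):
--       if len(i) <= l and len(i)>0:
--         psl.append(i)
--     return psl
-- ===== SOURCE B (Python) =====
-- def powerSetLimited(s, l):
--     subsets = [[]]
--     for e in s:
--         subsets = subsets + [sub + [e] for sub in subsets]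
--     return [sub for sub in subsets if 1 <= len(sub) <= l]
-- ===== Notes on version B (the rewrite author's own statement) =====
-- stated objective: simpler
-- what changed: Replaces A's bit-mask enumeration (generate all 2^n masks and decode each by zipping with a precomputed powers-of-two list) with iterative list doubling (subsets = subsets + [sub+[e] ...]) followed by one size filter.
import Mathlib
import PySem

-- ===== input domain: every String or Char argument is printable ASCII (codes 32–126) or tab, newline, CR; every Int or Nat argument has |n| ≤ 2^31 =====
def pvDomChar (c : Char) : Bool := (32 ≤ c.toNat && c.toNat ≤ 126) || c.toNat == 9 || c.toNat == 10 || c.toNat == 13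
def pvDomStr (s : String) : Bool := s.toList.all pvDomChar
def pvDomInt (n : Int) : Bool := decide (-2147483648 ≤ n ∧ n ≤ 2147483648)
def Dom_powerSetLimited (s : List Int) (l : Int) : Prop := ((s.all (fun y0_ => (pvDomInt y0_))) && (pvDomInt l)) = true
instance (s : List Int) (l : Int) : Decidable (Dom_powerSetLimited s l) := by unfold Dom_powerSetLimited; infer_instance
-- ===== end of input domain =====

-- B replaces A's bit-mask generator (enumerate all 2^n masks, decode each by zipping with precomputed
-- powers of two) by iterative list doubling followed by a single size filter; objective: simpler.

-- ===== PORT A =====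
-- Python's `1 << i` is Lean's `<<<`; the shift amounts here come from `range`/`len`, hence ≥ 0.
def powerSetLimited (s : List Int) (l : Int) : List (List Int) :=
  let x : Int := (s.length : Int)
  let masks : List Int := (PySem.List.pyRange 0 x 1).map (fun i => (1 : Int) <<< i.toNat)
  let ps : List (List Int) :=
    (PySem.List.pyRange 0 ((1 : Int) <<< x.toNat) 1).map (fun i =>
      ((masks.zip s).filter (fun p => !(PySem.Int.band i p.1 == 0))).map Prod.snd)
  ps.foldl (fun psl i => if ((i.length : Int) ≤ l ∧ (i.length : Int) > 0) then psl ++ [i] else psl) []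

-- ===== PORT B =====
def powerSetLimited_alt (s : List Int) (l : Int) : List (List Int) :=
  let subsets := s.foldl (fun acc e => acc ++ acc.map (fun sub => sub ++ [e])) [[]]
  subsets.filter (fun sub => decide (1 ≤ (sub.length : Int) ∧ (sub.length : Int) ≤ l))

-- ===== PRECONDITION & SPEC =====
def Spec_powerSetLimited (s : List Int) (l : Int) (out : List (List Int)) : Prop := out = powerSetLimited_alt s l
instance (s : List Int) (l : Int) (out : List (List Int)) : Decidable (Spec_powerSetLimited s l out) := by unfold Spec_powerSetLimited; infer_instance

-- ===== CLAIM (what is proved, stated in full; the proofs are below) =====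
def Claim_equal_powerSetLimited : Prop := ∀ (s : List Int) (l : Int), Dom_powerSetLimited s l → Spec_powerSetLimited s l (powerSetLimited s l)

-- ===== LEMMAS AND PROOFS =====

-- the subset A's generator yields for bit mask i
def pvDec (s : List Int) (i : Nat) : List Int :=
  ((((List.range s.length).map (fun j => ((2 ^ j : Nat) : Int))).zip s).filter
     (fun p => !(PySem.Int.band (i : Int) p.1 == 0))).map Prod.snd

theorem pvAnd_two_pow_ne (i n : Nat) : (i &&& 2 ^ n ≠ 0) ↔ i.testBit n = true := by
  rw [Nat.and_two_pow]
  cases h : i.testBit n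
  · simp
  · simp

theorem pvDec_append (s : List Int) (e : Int) (i : Nat) :
    pvDec (s ++ [e]) i = pvDec s i ++ (if i.testBit s.length then [e] else []) := by
  unfold pvDec
  rw [List.length_append, List.length_singleton, List.range_succ, List.map_append,
      List.zip_append (by simp)]
  simp only [List.map_cons, List.map_nil, List.zip_cons_cons, List.zip_nil_right,
    List.filter_append, List.map_append]
  congr 1
  rw [List.filter_cons, List.filter_nil]
  have hb : PySem.Int.band (i : Int) ((2 : Int) ^ s.length) = ((i &&& 2 ^ s.length : Nat) : Int) := by
    exact_mod_cast PySem.Int.band_natCast i (2 ^ s.length)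
  by_cases h : i.testBit s.length
  · have hnz : i &&& 2 ^ s.length ≠ 0 := (pvAnd_two_pow_ne i s.length).mpr h
    have : ¬ PySem.Int.band (i : Int) ((2 : Int) ^ s.length) = 0 := by
      rw [hb]; exact_mod_cast hnz
    simp [this, h]
  · have hz : i &&& 2 ^ s.length = 0 := by
      by_contra hc; exact h ((pvAnd_two_pow_ne i s.length).mp hc)
    have : PySem.Int.band (i : Int) ((2 : Int) ^ s.length) = 0 := by
      rw [hb]; exact_mod_cast hz
    simp [this, h]

theorem pvDec_low (s : List Int) (e : Int) (i : Nat) (h : i < 2 ^ s.length) :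
    pvDec (s ++ [e]) i = pvDec s i := by
  rw [pvDec_append, Nat.testBit_lt_two_pow h]
  simp

theorem pvDec_shift (s : List Int) (i : Nat) :
    pvDec s (2 ^ s.length + i) = pvDec s i := by
  unfold pvDec
  congr 1
  apply List.filter_congr
  intro p hp
  obtain ⟨a, b⟩ := p
  have h1 : a ∈ (List.range s.length).map (fun j => ((2 ^ j : Nat) : Int)) :=
    (List.of_mem_zip hp).1
  obtain ⟨j, hj, hpe⟩ := List.mem_map.mp h1
  rw [List.mem_range] at hj
  rw [← hpe]
  simp only [PySem.Int.band_natCast]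
  rw [Nat.and_two_pow, Nat.and_two_pow, Nat.testBit_two_pow_add_gt hj]

theorem pvDec_high (s : List Int) (e : Int) (i : Nat) (h : i < 2 ^ s.length) :
    pvDec (s ++ [e]) (2 ^ s.length + i) = pvDec s i ++ [e] := by
  rw [pvDec_append]
  have ht : (2 ^ s.length + i).testBit s.length = true := by
    rw [Nat.testBit_two_pow_add_eq, Nat.testBit_lt_two_pow h]
    rfl
  rw [ht, pvDec_shift]
  simp

-- A's generator, decoded mask by mask, builds exactly B's doubling list
theorem pvMain (s : List Int) :
    (List.range (2 ^ s.length)).map (pvDec s) =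
      s.foldl (fun acc e => acc ++ acc.map (fun sub => sub ++ [e])) [[]] := by
  induction s using List.reverseRecOn with
  | nil => simp [pvDec]
  | append_singleton s e ih =>
    rw [List.foldl_append]
    simp only [List.foldl_cons, List.foldl_nil]
    rw [← ih]
    rw [List.length_append, List.length_singleton, pow_succ, mul_two, List.range_add,
        List.map_append, List.map_map]
    congr 1
    · apply List.map_congr_left
      intro i hi
      exact pvDec_low s e i (List.mem_range.mp hi)
    · rw [List.map_map]
      apply List.map_congr_left
      intro i hi
      simp only [Function.comp_apply]
      exact pvDec_high s e i (List.mem_range.mp hi)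

theorem powerSetLimited_eq_filter (s : List Int) (l : Int) :
    powerSetLimited s l =
      ((List.range (2 ^ s.length)).map (pvDec s)).filter
        (fun i => decide ((i.length : Int) ≤ l ∧ (i.length : Int) > 0)) := by
  unfold powerSetLimited
  have hmask : (PySem.List.pyRange 0 ((s.length : Int)) 1).map (fun i => (1 : Int) <<< i.toNat)
      = (List.range s.length).map (fun j => ((2 ^ j : Nat) : Int)) := by
    rw [PySem.List.pyRange_zero_natCast, List.map_map]
    apply List.map_congr_left; intro j _
    simp [Int.one_shiftLeft]
  have hlen : (1 : Int) <<< ((s.length : Int)).toNat = ((2 ^ s.length : Nat) : Int) := by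
    have : ((s.length : Int)).toNat = s.length := Int.toNat_natCast s.length
    rw [this, Int.shiftLeft_eq]
    push_cast
    ring
  simp only [hmask]
  simp only [hlen, PySem.List.pyRange_zero_natCast, List.map_map,
    PySem.List.foldl_append_ite_eq_filter (fun i : List Int => (i.length : Int) ≤ l ∧ (i.length : Int) > 0),
    List.nil_append]
  congr 1

-- ===== VERDICT (by name: the statement is the Claim_ definition above) =====
theorem powerSetLimited_spec : Claim_equal_powerSetLimited := by
  intro s l _
  unfold Spec_powerSetLimited powerSetLimited_alt
  rw [powerSetLimited_eq_filter, pvMain]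
  apply List.filter_congr
  intro x _
  simp only [decide_eq_decide]
  omega
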